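-- pv_equiv track=rewrite | github.com/PandoraAZK/PAIT3 | Learning.py | trainSave
-- ===== SOURCE A (Python) =====
-- def trainModel(learnArray):
--     positiveArr = []
--     negativeArr = []
--
--     for i in learnArray:
--         if i[3] == 1:
--             positiveArr.append(i)
--         elif i[3] == 0:
--             negativeArr.append(i)
--
--     return positiveArr, negativeArr
--
-- def trainSave(learnArr):
--     trainArr = []
--     positiveArr, negativeArr = trainModel(learnArr)
--
--     for i in negativeArr:
--         trainArr.append(i)
--
--     for i in positiveArr:
--         trainArr.append(i)
--
--     return trainArr
-- ===== SOURCE B (Python) =====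
-- def trainSave(learnArr):
--     return sorted((e for e in learnArr if e[3] == 0 or e[3] == 1),
--                   key=lambda e: e[3])
-- ===== Notes on version B (the rewrite author's own statement) =====
-- stated objective: alternative
-- what changed: Replaces A's two-bucket partition (build positive and negative lists, then concatenate them with two append loops) by a single filter of the 0/1-labelled rows followed by a stable sort on the label, whose stability yields negatives-then-positives in original order.
import Mathlib
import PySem

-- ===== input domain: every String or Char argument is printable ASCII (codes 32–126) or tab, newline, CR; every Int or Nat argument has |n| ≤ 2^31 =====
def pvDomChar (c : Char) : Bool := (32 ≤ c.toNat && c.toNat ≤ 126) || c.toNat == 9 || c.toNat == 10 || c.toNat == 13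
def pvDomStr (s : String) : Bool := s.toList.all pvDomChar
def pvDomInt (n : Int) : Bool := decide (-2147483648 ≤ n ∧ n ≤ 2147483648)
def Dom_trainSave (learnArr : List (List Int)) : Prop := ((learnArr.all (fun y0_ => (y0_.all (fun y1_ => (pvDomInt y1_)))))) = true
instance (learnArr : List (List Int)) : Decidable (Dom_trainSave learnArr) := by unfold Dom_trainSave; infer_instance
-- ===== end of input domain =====

-- B replaces A's two-bucket partition + two append loops by filter-then-stable-sort on the label (alternative decomposition).
-- ===== PORT A =====
-- trainModel: one pass appending each row to positiveArr (label 1) or negativeArr (label 0)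
def trainModel (learnArray : List (List Int)) : List (List Int) × List (List Int) :=
  learnArray.foldl (fun acc i =>
    if PySem.List.pyGetD i 3 0 = 1 then (acc.1 ++ [i], acc.2)
    else if PySem.List.pyGetD i 3 0 = 0 then (acc.1, acc.2 ++ [i])
    else acc) ([], [])

def trainSave (learnArr : List (List Int)) : List (List Int) :=
  let pn := trainModel learnArr
  let t1 := pn.2.foldl (fun acc i => acc ++ [i]) []
  pn.1.foldl (fun acc i => acc ++ [i]) t1

-- ===== PORT B =====
def trainSave_alt (learnArr : List (List Int)) : List (List Int) :=
  PySem.List.sorted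
    (learnArr.filter (fun e => PySem.List.pyGetD e 3 0 = 0 ∨ PySem.List.pyGetD e 3 0 = 1))
    (fun e => PySem.List.pyGetD e 3 0) false

-- ===== PRECONDITION & SPEC =====
-- Pre_ excludes exactly the inputs where Python's i[3] raises IndexError (a row with fewer than 4 entries).
def Pre_trainSave (learnArr : List (List Int)) : Prop := ∀ r ∈ learnArr, 3 < r.length
instance (learnArr : List (List Int)) : Decidable (Pre_trainSave learnArr) := by unfold Pre_trainSave; infer_instance
def pvWitness_trainSave : List (List Int) := [[5, 6, 7, 1], [8, 9, 10, 0], [1, 2, 3, 2]]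
def Spec_trainSave (learnArr : List (List Int)) (out : List (List Int)) : Prop := out = trainSave_alt learnArr
instance (learnArr : List (List Int)) (out : List (List Int)) : Decidable (Spec_trainSave learnArr out) := by unfold Spec_trainSave; infer_instance

-- ===== CLAIM (what is proved, stated in full; the proofs are below) =====
def Claim_equal_trainSave : Prop := ∀ (learnArr : List (List Int)), Dom_trainSave learnArr → Pre_trainSave learnArr → Spec_trainSave learnArr (trainSave learnArr)

-- ===== LEMMAS AND PROOFS =====

-- the A-side partition loop, with general accumulators
lemma trainModel_foldl (xs : List (List Int)) (p n : List (List Int)) :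
    xs.foldl (fun acc i =>
      if PySem.List.pyGetD i 3 0 = 1 then (acc.1 ++ [i], acc.2)
      else if PySem.List.pyGetD i 3 0 = 0 then (acc.1, acc.2 ++ [i])
      else acc) (p, n)
    = (p ++ xs.filter (fun e => PySem.List.pyGetD e 3 0 = 1),
       n ++ xs.filter (fun e => PySem.List.pyGetD e 3 0 = 0)) := by
  induction xs generalizing p n with
  | nil => simp
  | cons x xs ih =>
    by_cases h1 : PySem.List.pyGetD x 3 0 = 1
    · simp [List.foldl_cons, h1, ih]
    · by_cases h0 : PySem.List.pyGetD x 3 0 = 0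
      · simp [List.foldl_cons, h0, ih]
      · simp [List.foldl_cons, h0, h1, ih]

-- insertBy walks past a prefix it does not insert before
lemma insertBy_append_of_not_before (before : List Int → List Int → Bool) (x : List Int)
    (ys zs : List (List Int)) (h : ∀ y ∈ ys, before x y = false) :
    PySem.List.insertBy before x (ys ++ zs) = ys ++ PySem.List.insertBy before x zs := by
  induction ys with
  | nil => rfl
  | cons y ys ih =>
    have hy := h y (by simp)
    simp only [List.cons_append, PySem.List.insertBy, hy, Bool.false_eq_true, if_false]
    rw [ih (fun y hy => h y (by simp [hy]))]

-- insertion sort of a list whose keys are all 0 or 1 is the stable 0/1 partition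
lemma foldl_insertBy_01 (ys : List (List Int))
    (h : ∀ e ∈ ys, PySem.List.pyGetD e 3 0 = 0 ∨ PySem.List.pyGetD e 3 0 = 1) :
    ys.foldl (fun acc x =>
        PySem.List.insertBy
          (fun a b => decide (PySem.List.pyGetD a 3 0 < PySem.List.pyGetD b 3 0)) x acc) []
    = ys.filter (fun e => PySem.List.pyGetD e 3 0 = 0)
      ++ ys.filter (fun e => PySem.List.pyGetD e 3 0 = 1) := by
  induction ys using List.reverseRecOn with
  | nil => rfl
  | append_singleton ys x ih =>
    have hx := h x (by simp)
    have hys : ∀ e ∈ ys, PySem.List.pyGetD e 3 0 = 0 ∨ PySem.List.pyGetD e 3 0 = 1 :=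
      fun e he => h e (by simp [he])
    rw [List.foldl_append, ih hys]
    simp only [List.foldl_cons, List.foldl_nil, List.filter_append]
    rcases hx with hx | hx
    · -- key x = 0: skip the 0-block, insert before the 1-block
      rw [insertBy_append_of_not_before _ x _ _ (by
        intro y hy
        have := (List.mem_filter.mp hy).2
        simp_all)]
      have h1 : PySem.List.insertBy
          (fun a b => decide (PySem.List.pyGetD a 3 0 < PySem.List.pyGetD b 3 0)) x
          (ys.filter (fun e => PySem.List.pyGetD e 3 0 = 1))
          = x :: ys.filter (fun e => PySem.List.pyGetD e 3 0 = 1) := by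
        cases hf : ys.filter (fun e => PySem.List.pyGetD e 3 0 = 1) with
        | nil => rfl
        | cons z zs =>
          have hz : PySem.List.pyGetD z 3 0 = 1 := by
            have : z ∈ ys.filter (fun e => PySem.List.pyGetD e 3 0 = 1) := by simp [hf]
            simpa using (List.mem_filter.mp this).2
          simp [PySem.List.insertBy, hx, hz]
      rw [h1]
      simp [hx]
    · -- key x = 1: x is never before anything, so it lands at the end
      rw [PySem.List.insertBy_of_forall_not_before _ _ _ (by
        intro y hy
        rcases List.mem_append.mp hy with hy | hy <;>
          have := (List.mem_filter.mp hy).2 <;> simp_all)]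
      simp [hx, List.append_assoc]

lemma sorted_01 (xs : List (List Int)) :
    PySem.List.sorted
      (xs.filter (fun e => PySem.List.pyGetD e 3 0 = 0 ∨ PySem.List.pyGetD e 3 0 = 1))
      (fun e => PySem.List.pyGetD e 3 0) false
    = xs.filter (fun e => PySem.List.pyGetD e 3 0 = 0)
      ++ xs.filter (fun e => PySem.List.pyGetD e 3 0 = 1) := by
  rw [PySem.List.sorted_eq_foldl_insertBy,
    foldl_insertBy_01 _ (fun e he => by simpa using (List.mem_filter.mp he).2)]
  have h0 : (xs.filter (fun e => PySem.List.pyGetD e 3 0 = 0 ∨ PySem.List.pyGetD e 3 0 = 1)).filter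
      (fun e => PySem.List.pyGetD e 3 0 = 0) = xs.filter (fun e => PySem.List.pyGetD e 3 0 = 0) := by
    rw [List.filter_filter]
    apply List.filter_congr
    intro a _
    by_cases h : PySem.List.pyGetD a 3 0 = 0 <;> simp [h]
  have h1 : (xs.filter (fun e => PySem.List.pyGetD e 3 0 = 0 ∨ PySem.List.pyGetD e 3 0 = 1)).filter
      (fun e => PySem.List.pyGetD e 3 0 = 1) = xs.filter (fun e => PySem.List.pyGetD e 3 0 = 1) := by
    rw [List.filter_filter]
    apply List.filter_congr
    intro a _
    by_cases h : PySem.List.pyGetD a 3 0 = 1 <;> simp [h]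
  rw [h0, h1]

-- ===== VERDICT (by name: the statement is the Claim_ definition above) =====
theorem trainSave_spec : Claim_equal_trainSave := by
  intro learnArr _ _
  unfold Spec_trainSave trainSave trainSave_alt trainModel
  rw [trainModel_foldl learnArr [] [], sorted_01,
    PySem.List.foldl_append_singleton, PySem.List.foldl_append_singleton]
  simp
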